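-- pv_equiv track=rewrite | github.com/MrBrantCode/unitest_baseline | mut_generate/mist_train_cf/cf_95539/solution.py | has_negative_number
-- ===== SOURCE A (Python) =====
-- def has_negative_number(numbers):
--     # Calculate the product of all the numbers in the array
--     product = 1
--     for num in numbers:
--         product *= num
--
--     # If the product is negative, then there must be at least one negative number in the array
--     if product < 0:
--         return True
--     else:
--         return False
-- ===== SOURCE B (Python) =====
-- def has_negative_number(numbers):
--     neg = False
--     for n in numbers:
--         if n == 0:
--             return False
--         if n < 0:
--             neg = not neg
--     return neg
-- ===== Notes on version B (the rewrite author's own statement) =====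
-- stated objective: faster
-- what changed: B never multiplies: one pass that returns False at the first zero and otherwise tracks the parity of negative elements, instead of A's accumulated bignum product whose sign is tested at the end.
import Mathlib
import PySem

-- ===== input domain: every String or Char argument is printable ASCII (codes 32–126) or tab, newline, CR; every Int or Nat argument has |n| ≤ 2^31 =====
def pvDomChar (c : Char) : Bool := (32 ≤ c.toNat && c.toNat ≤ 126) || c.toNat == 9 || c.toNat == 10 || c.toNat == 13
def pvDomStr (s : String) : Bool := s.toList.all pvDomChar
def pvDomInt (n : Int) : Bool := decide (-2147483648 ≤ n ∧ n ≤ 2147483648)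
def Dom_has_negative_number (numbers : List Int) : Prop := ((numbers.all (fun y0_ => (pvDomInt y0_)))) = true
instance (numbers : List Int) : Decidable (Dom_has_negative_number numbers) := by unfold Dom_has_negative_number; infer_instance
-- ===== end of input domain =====

-- ===== PORT A =====
-- A: multiply everything into `product`, then test its sign.
def has_negative_number (numbers : List Int) : Bool :=
  let product := numbers.foldl (fun acc num => acc * num) 1
  if product < 0 then true else false

-- ===== PORT B =====
-- B: one pass, early False on a zero, otherwise flip a parity flag on each negative.
def altGo (numbers : List Int) (neg : Bool) : Bool :=
  match numbers with
  | [] => neg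
  | n :: rest => if n == 0 then false else altGo rest (if n < 0 then !neg else neg)

def has_negative_number_alt (numbers : List Int) : Bool := altGo numbers false

-- ===== PRECONDITION & SPEC =====
def Spec_has_negative_number (numbers : List Int) (out : Bool) : Prop := out = has_negative_number_alt numbers
instance (numbers : List Int) (out : Bool) : Decidable (Spec_has_negative_number numbers out) := by unfold Spec_has_negative_number; infer_instance

-- ===== CLAIM (what is proved, stated in full; the proofs are below) =====
def Claim_equal_has_negative_number : Prop := ∀ (numbers : List Int), Dom_has_negative_number numbers → Spec_has_negative_number numbers (has_negative_number numbers)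

-- ===== LEMMAS AND PROOFS =====

-- (verdict below)
-- =====
theorem foldl_mul_eq_prod (l : List Int) (a : Int) :
    l.foldl (fun acc num => acc * num) a = a * l.prod := by
  induction l generalizing a with
  | nil => simp
  | cons n rest ih => simp [List.foldl, ih, mul_assoc]

theorem altGo_eq (l : List Int) (neg : Bool) :
    altGo l neg = if l.prod = 0 then false else (neg ^^ decide (l.prod < 0)) := by
  induction l generalizing neg with
  | nil => simp [altGo]
  | cons n rest ih =>
    by_cases hn0 : n = 0
    · simp [altGo, hn0]
    · have hprod : (n :: rest).prod = n * rest.prod := List.prod_cons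
      by_cases hr0 : rest.prod = 0
      · simp [altGo, hn0, ih, hprod, hr0]
      · have hm0 : n * rest.prod ≠ 0 := mul_ne_zero hn0 hr0
        rcases lt_trichotomy n 0 with hn | hn | hn
        · have hsign : n * rest.prod < 0 ↔ ¬ rest.prod < 0 := by
            constructor
            · intro h hr
              exact absurd (mul_pos_of_neg_of_neg hn hr) (by linarith)
            · intro hr
              have : 0 < rest.prod := lt_of_le_of_ne (not_lt.mp hr) (Ne.symm hr0)
              exact mul_neg_of_neg_of_pos hn this
          simp only [altGo, beq_iff_eq, hn0, if_false, if_pos hn, ih, hr0, if_false,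
            hprod, if_neg hm0]
          by_cases hr : rest.prod < 0 <;>
            simp [hr, hsign.mpr, hsign]
        · exact absurd hn hn0
        · have hsign : n * rest.prod < 0 ↔ rest.prod < 0 := by
            constructor
            · intro h
              by_contra hr
              have : 0 < rest.prod := lt_of_le_of_ne (not_lt.mp hr) (Ne.symm hr0)
              exact absurd (mul_pos hn this) (by linarith)
            · intro hr; exact mul_neg_of_pos_of_neg hn hr
          have : ¬ n < 0 := by linarith
          simp [altGo, hn0, this, ih, hr0, hprod, hm0, hsign]

-- ===== VERDICT (by name: the statement is the Claim_ definition above) =====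
theorem has_negative_number_spec : Claim_equal_has_negative_number := by
  intro numbers _
  unfold Spec_has_negative_number has_negative_number has_negative_number_alt
  rw [foldl_mul_eq_prod, one_mul, altGo_eq]
  by_cases h0 : numbers.prod = 0
  · simp [h0]
  · by_cases h : numbers.prod < 0 <;> simp [h0, h]
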